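-- pv_equiv track=rewrite | github.com/arun271100/MTICA | PP_CountOwels_Consonents05.py | extract_Owels_Consonents
-- ===== SOURCE A (Python) =====
-- def extract_Owels_Consonents(s):
--     temp_owel=''
--     temp_consonent=''
--     temp_number=''
--     temp_spl=''
--     for i in s:
--         if i in 'AEIOUaeiou':
--             temp_owel+=i
--         elif i in '0123456789':
--             temp_number+=i
--         elif i in 'BCDFGHJKLMNPQRSTVWXYZbcdfghjklmnpqrstvwxyz':
--             temp_consonent+=i
--         else:
--              temp_spl+=i
--     lst=[]
--     lst.append(temp_owel)
--     lst.append(temp_consonent)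
--     lst.append(temp_number)
--     lst.append(temp_spl)
--     return lst
-- ===== SOURCE B (Python) =====
-- def extract_Owels_Consonents(s):
--     vowels = ''.join(c for c in s if c in 'AEIOUaeiou')
--     consonants = ''.join(c for c in s if c in 'BCDFGHJKLMNPQRSTVWXYZbcdfghjklmnpqrstvwxyz')
--     numbers = ''.join(c for c in s if c in '0123456789')
--     specials = ''.join(c for c in s
--                        if c not in 'AEIOUaeiou'
--                        and c not in '0123456789'
--                        and c not in 'BCDFGHJKLMNPQRSTVWXYZbcdfghjklmnpqrstvwxyz')
--     return [vowels, consonants, numbers, specials]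
-- ===== Notes on version B (the rewrite author's own statement) =====
-- stated objective: alternative
-- what changed: Replaces the single classifying pass with an if/elif chain and four string accumulators by four independent filtered joins, one per bucket, relying on the three character classes being disjoint.
import Mathlib
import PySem

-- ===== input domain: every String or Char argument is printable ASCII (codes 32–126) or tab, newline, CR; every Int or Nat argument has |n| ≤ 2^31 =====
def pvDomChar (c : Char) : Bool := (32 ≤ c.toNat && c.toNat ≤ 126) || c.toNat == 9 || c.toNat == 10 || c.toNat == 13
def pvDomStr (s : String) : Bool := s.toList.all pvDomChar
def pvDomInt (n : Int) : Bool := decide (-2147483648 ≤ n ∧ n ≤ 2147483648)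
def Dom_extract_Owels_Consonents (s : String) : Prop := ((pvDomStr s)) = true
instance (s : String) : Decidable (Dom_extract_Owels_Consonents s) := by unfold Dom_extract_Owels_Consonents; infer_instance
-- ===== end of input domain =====

-- B replaces A's single if/elif classifying pass by four independent filtered joins (same O(n) cost, different decomposition).


-- ===== PORT A =====
-- membership tests 'i in <literal string>' for single chars
def pvIsVowel (c : Char) : Bool := "AEIOUaeiou".toList.contains c
def pvIsDigit (c : Char) : Bool := "0123456789".toList.contains c
def pvIsCons (c : Char) : Bool := "BCDFGHJKLMNPQRSTVWXYZbcdfghjklmnpqrstvwxyz".toList.contains c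

-- the for-loop: state = the four accumulator strings (as char lists), branches in A's order
def pvLoopA : List Char → List Char × List Char × List Char × List Char →
    List Char × List Char × List Char × List Char
  | [], st => st
  | i :: rest, (v, c, n, sp) =>
    if pvIsVowel i then pvLoopA rest (v ++ [i], c, n, sp)
    else if pvIsDigit i then pvLoopA rest (v, c, n ++ [i], sp)
    else if pvIsCons i then pvLoopA rest (v, c ++ [i], n, sp)
    else pvLoopA rest (v, c, n, sp ++ [i])

def extract_Owels_Consonents (s : String) : List String :=
  let st := pvLoopA s.toList ([], [], [], [])
  [String.mk st.1, String.mk st.2.1, String.mk st.2.2.1, String.mk st.2.2.2]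

-- ===== PORT B =====
def extract_Owels_Consonents_alt (s : String) : List String :=
  let cs := s.toList
  let vowels := String.mk (cs.filter pvIsVowel)
  let consonants := String.mk (cs.filter pvIsCons)
  let numbers := String.mk (cs.filter pvIsDigit)
  let specials := String.mk (cs.filter (fun c => !pvIsVowel c && !pvIsDigit c && !pvIsCons c))
  [vowels, consonants, numbers, specials]

-- ===== PRECONDITION & SPEC =====
def Spec_extract_Owels_Consonents (s : String) (out : List String) : Prop := out = extract_Owels_Consonents_alt s
instance (s : String) (out : List String) : Decidable (Spec_extract_Owels_Consonents s out) := by unfold Spec_extract_Owels_Consonents; infer_instance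

-- ===== CLAIM (what is proved, stated in full; the proofs are below) =====
def Claim_equal_extract_Owels_Consonents : Prop := ∀ (s : String), Dom_extract_Owels_Consonents s → Spec_extract_Owels_Consonents s (extract_Owels_Consonents s)

-- ===== LEMMAS AND PROOFS =====
-- the three character classes are pairwise disjoint
lemma pvVowel_not_digit {c : Char} (h : pvIsVowel c = true) : pvIsDigit c = false := by
  simp [pvIsVowel] at h; rcases h with h|h|h|h|h|h|h|h|h|h <;> subst h <;> decide

lemma pvVowel_not_cons {c : Char} (h : pvIsVowel c = true) : pvIsCons c = false := by
  simp [pvIsVowel] at h; rcases h with h|h|h|h|h|h|h|h|h|h <;> subst h <;> decide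

lemma pvDigit_not_cons {c : Char} (h : pvIsDigit c = true) : pvIsCons c = false := by
  simp [pvIsDigit] at h; rcases h with h|h|h|h|h|h|h|h|h|h <;> subst h <;> decide

lemma pvLoopA_eq (cs v c n sp : List Char) :
    pvLoopA cs (v, c, n, sp) =
      (v ++ cs.filter pvIsVowel, c ++ cs.filter pvIsCons, n ++ cs.filter pvIsDigit,
       sp ++ cs.filter (fun x => !pvIsVowel x && !pvIsDigit x && !pvIsCons x)) := by
  induction cs generalizing v c n sp with
  | nil => simp [pvLoopA]
  | cons i rest ih =>
    by_cases hv : pvIsVowel i = true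
    · simp [pvLoopA, hv, pvVowel_not_digit hv, pvVowel_not_cons hv, ih, List.filter]
    · by_cases hd : pvIsDigit i = true
      · simp [pvLoopA, hv, hd, pvDigit_not_cons hd, ih, List.filter]
      · by_cases hc : pvIsCons i = true
        · simp [pvLoopA, hv, hd, hc, ih, List.filter]
        · simp [pvLoopA, hv, hd, hc, ih, List.filter]

-- ===== VERDICT (by name: the statement is the Claim_ definition above) =====
theorem extract_Owels_Consonents_spec : Claim_equal_extract_Owels_Consonents := by
  intro s _
  show _ = _
  simp [extract_Owels_Consonents, extract_Owels_Consonents_alt, pvLoopA_eq]
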